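-- pv_equiv track=rewrite | github.com/nkkrnkl/category-agnostic-pose-estimation | datasets/data_utils.py | sort_polygons
-- ===== SOURCE A (Python) =====
-- def get_top_left(polygon):
--     return min(polygon, key=lambda p: (p[1], p[0]))  # y ascending, x ascending
--
-- def sort_polygons(polygons, tolerance=20, reverse=False):
--     # Step 1: Get top-left corner and original index
--     indexed = [(i, get_top_left(p), p) for i, p in enumerate(polygons)]
--
--     # Step 2: Sort by Y (top to bottom)
--     indexed.sort(key=lambda x: x[1][1])
--
--     # Step 3: Group into rows
--     rows = []
--     for idx, corner, poly in indexed: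
--         y = corner[1]
--         added = False
--         for row in rows:
--             if abs(row[0][1][1] - y) <= tolerance:
--                 row.append((idx, corner, poly))
--                 added = True
--                 break
--         if not added:
--             rows.append([(idx, corner, poly)])
--
--     # Step 4: Sort each row left-to-right
--     for row in rows:
--         row.sort(key=lambda x: x[1][0])  # sort by x
--
--     # Step 5: Flatten and return indices
--     sorted_indices = [idx for row in rows for idx, _, _ in row]
--     if reverse:
--         sorted_indices = sorted_indices[::-1]
--     sorted_polygons = [polygons[idx] for idx in sorted_indices]
--
--     return sorted_polygons, sorted_indices
-- ===== SOURCE B (Python) =====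
-- def sort_polygons(polygons, tolerance=20, reverse=False):
--     # Top-left corner of each polygon as (y, x).
--     corners = [min((y, x) for x, y in p) for p in polygons]
--     # Indices sorted top-to-bottom (stable).
--     order = sorted(range(len(polygons)), key=lambda i: corners[i][0])
--     # Group into rows with a single monotone pointer over the row reference ys
--     # (they are created in increasing order, so the first row within tolerance
--     # is the first one whose reference y is >= y - tolerance).
--     rows, refs, j = [], [], 0
--     for i in order:
--         y = corners[i][0]
--         while j < len(refs) and refs[j] < y - tolerance:
--             j += 1
--         if j < len(refs):
--             rows[j].append(i)
--         else:
--             rows.append([i])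
--             refs.append(y)
--     # Sort each row left-to-right and flatten.
--     indices = []
--     for row in rows:
--         row.sort(key=lambda i: corners[i][1])
--         indices.extend(row)
--     if reverse:
--         indices.reverse()
--     return [polygons[i] for i in indices], indices
-- ===== Notes on version B (the rewrite author's own statement) =====
-- stated objective: faster
-- what changed: B groups the y-sorted polygons into rows with a single monotone pointer over the increasing row-reference ys (replacing A's linear scan of all rows for every polygon) and works on sorted index lists instead of (index, corner, polygon) triples.
import Mathlib
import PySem

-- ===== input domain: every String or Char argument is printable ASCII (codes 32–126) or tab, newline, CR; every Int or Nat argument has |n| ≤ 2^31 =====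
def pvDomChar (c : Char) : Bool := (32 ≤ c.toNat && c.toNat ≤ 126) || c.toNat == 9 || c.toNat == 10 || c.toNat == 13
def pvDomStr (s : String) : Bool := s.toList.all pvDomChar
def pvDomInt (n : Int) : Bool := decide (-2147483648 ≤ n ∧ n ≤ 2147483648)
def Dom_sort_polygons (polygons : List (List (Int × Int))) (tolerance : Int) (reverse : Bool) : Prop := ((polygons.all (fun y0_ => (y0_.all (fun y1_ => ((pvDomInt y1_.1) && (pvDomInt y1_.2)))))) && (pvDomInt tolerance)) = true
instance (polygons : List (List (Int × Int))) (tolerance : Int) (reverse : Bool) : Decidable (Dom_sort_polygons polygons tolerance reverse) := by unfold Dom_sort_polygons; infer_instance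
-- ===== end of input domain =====

-- B replaces A's quadratic first-matching-row scan by a single monotone pointer over the
-- (increasing) row reference ys and sorts indices instead of (index, corner, polygon) triples;
-- objective: faster (grouping O(n) instead of O(n^2) after the sort).

-- ===== PORT A =====
-- get_top_left(polygon) = min(polygon, key=lambda p: (p[1], p[0])); none only for an empty
-- polygon, which Pre_ excludes (Python raises ValueError there).
def pvTopLeft (p : List (Int × Int)) : Int × Int :=
  (PySem.List.min2? p (fun q => q.2) (fun q => q.1)).getD (0, 0)

-- row[0][1][1]; rows are never empty so the default is never used
def pvRowY (row : List (Int × (Int × Int) × List (Int × Int))) : Int :=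
  ((row.headD (0, (0, 0), [])).2.1).2

-- Step 3 inner loop: append t to the first row within tolerance, else a new row at the end
def pvPlace (tolerance : Int) (t : Int × (Int × Int) × List (Int × Int)) :
    List (List (Int × (Int × Int) × List (Int × Int))) → List (List (Int × (Int × Int) × List (Int × Int)))
  | [] => [[t]]
  | row :: rest =>
      if |pvRowY row - t.2.1.2| ≤ tolerance then (row ++ [t]) :: rest
      else row :: pvPlace tolerance t rest

def sort_polygons (polygons : List (List (Int × Int))) (tolerance : Int) (reverse : Bool) : (List (List (Int × Int))) × List Int :=
  let indexed := (PySem.List.enumerate polygons).map (fun ip => (ip.1, pvTopLeft ip.2, ip.2))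
  let indexed := PySem.List.sorted indexed (fun t => t.2.1.2)
  let rows := indexed.foldl (fun rows t => pvPlace tolerance t rows) []
  let rows := rows.map (fun row => PySem.List.sorted row (fun t => t.2.1.1))
  let sorted_indices := rows.flatMap (fun row => row.map (fun t => t.1))
  let sorted_indices := if reverse then sorted_indices.reverse else sorted_indices
  (sorted_indices.map (fun idx => PySem.List.pyGetD polygons idx []), sorted_indices)

-- ===== PORT B =====
-- corners[i] = min((y, x) for x, y in p); none only for an empty polygon (excluded by Pre_)
def pvCorner (p : List (Int × Int)) : Int × Int :=
  (PySem.List.min2? (p.map (fun q => (q.2, q.1))) (fun c => c.1) (fun c => c.2)).getD (0, 0)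

-- the while loop: advance j past all reference ys below y - tolerance
def pvAdvance (tolerance y : Int) (refs : List Int) (j : Nat) : Nat :=
  if h : j < refs.length then
    if refs[j] < y - tolerance then pvAdvance tolerance y refs (j + 1) else j
  else j
termination_by refs.length - j

-- one iteration of B's grouping loop, state = (rows, refs, j)
def pvBStep (tolerance : Int) (corners : List (Int × Int))
    (st : List (List Int) × List Int × Nat) (i : Int) : List (List Int) × List Int × Nat :=
  let y := (PySem.List.pyGetD corners i (0, 0)).1
  let j := pvAdvance tolerance y st.2.1 st.2.2
  if j < st.2.1.length then (st.1.modify j (fun row => row ++ [i]), st.2.1, j)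
  else (st.1 ++ [[i]], st.2.1 ++ [y], j)

def sort_polygons_alt (polygons : List (List (Int × Int))) (tolerance : Int) (reverse : Bool) : (List (List (Int × Int))) × List Int :=
  let corners := polygons.map pvCorner
  let order := PySem.List.sorted (PySem.List.pyRange 0 (PySem.List.len polygons))
      (fun i => (PySem.List.pyGetD corners i (0, 0)).1)
  let st := order.foldl (pvBStep tolerance corners) ([], [], 0)
  let indices := st.1.foldl
      (fun acc row => acc ++ PySem.List.sorted row (fun i => (PySem.List.pyGetD corners i (0, 0)).2)) []
  let indices := if reverse then indices.reverse else indices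
  (indices.map (fun i => PySem.List.pyGetD polygons i []), indices)

-- ===== PRECONDITION & SPEC =====
-- Pre_ excludes inputs containing an empty polygon: Python's min(...) raises ValueError there (in A and in B).
def Pre_sort_polygons (polygons : List (List (Int × Int))) (tolerance : Int) (reverse : Bool) : Prop :=
  ∀ p ∈ polygons, p ≠ []
instance (polygons : List (List (Int × Int))) (tolerance : Int) (reverse : Bool) : Decidable (Pre_sort_polygons polygons tolerance reverse) := by unfold Pre_sort_polygons; infer_instance

def pvWitness_sort_polygons : (List (List (Int × Int))) × Int × Bool :=
  ([[(0, 5), (3, 1)], [(9, 2)], [(4, 40)]], 20, false)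

def Spec_sort_polygons (polygons : List (List (Int × Int))) (tolerance : Int) (reverse : Bool) (out : (List (List (Int × Int))) × List Int) : Prop := out = sort_polygons_alt polygons tolerance reverse
instance (polygons : List (List (Int × Int))) (tolerance : Int) (reverse : Bool) (out : (List (List (Int × Int))) × List Int) : Decidable (Spec_sort_polygons polygons tolerance reverse out) := by unfold Spec_sort_polygons; infer_instance

-- ===== CLAIM (what is proved, stated in full; the proofs are below) =====
def Claim_equal_sort_polygons : Prop := ∀ (polygons : List (List (Int × Int))) (tolerance : Int) (reverse : Bool), Dom_sort_polygons polygons tolerance reverse → Pre_sort_polygons polygons tolerance reverse → Spec_sort_polygons polygons tolerance reverse (sort_polygons polygons tolerance reverse)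

-- ===== LEMMAS AND PROOFS =====

-- the (index, corner, polygon) triple of polygon j, and its corner coordinates
def pvF (polygons : List (List (Int × Int))) (j : Int) : Int × (Int × Int) × List (Int × Int) :=
  (j, pvTopLeft (PySem.List.pyGetD polygons j []), PySem.List.pyGetD polygons j [])

def pvY (polygons : List (List (Int × Int))) (j : Int) : Int :=
  (pvTopLeft (PySem.List.pyGetD polygons j [])).2

def pvX (polygons : List (List (Int × Int))) (j : Int) : Int :=
  (pvTopLeft (PySem.List.pyGetD polygons j [])).1

-- invariant tying A's grouping state (rows of triples) to B's state (rows of indices, refs, pointer)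
def pvInv (polygons : List (List (Int × Int))) (tol : Int)
    (rowsA : List (List (Int × (Int × Int) × List (Int × Int))))
    (st : List (List Int) × List Int × Nat) (rest : List Int) : Prop :=
  st.1 = rowsA.map (List.map (fun t => t.1)) ∧
  st.2.1 = rowsA.map pvRowY ∧
  st.2.2 ≤ st.2.1.length ∧
  (∀ row ∈ rowsA, row ≠ [] ∧ ∀ t ∈ row, t = pvF polygons t.1) ∧
  (st.2.1).Pairwise (· ≤ ·) ∧
  (∀ j' ∈ rest, (∀ r ∈ st.2.1.take st.2.2, r < pvY polygons j' - tol) ∧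
                (∀ r ∈ st.2.1, r ≤ pvY polygons j'))

theorem pv_insertBy_map {α β κ : Type} [LT κ] [DecidableLT κ] (f : α → β) (key : β → κ) (x : α) :
    ∀ (ys : List α), PySem.List.insertBy (fun a b => decide (key a < key b)) (f x) (ys.map f) =
      (PySem.List.insertBy (fun a b => decide (key (f a) < key (f b))) x ys).map f := by
  intro ys
  induction ys with
  | nil => simp [PySem.List.insertBy]
  | cons y ys ih =>
    simp only [List.map_cons, PySem.List.insertBy]
    split <;> simp [ih]

theorem pv_sorted_map {α β κ : Type} [LT κ] [DecidableLT κ] (f : α → β) (key : β → κ) (xs : List α) :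
    PySem.List.sorted (xs.map f) key = (PySem.List.sorted xs (fun x => key (f x))).map f := by
  rw [PySem.List.sorted_eq_foldl_insertBy, PySem.List.sorted_eq_foldl_insertBy, List.foldl_map]
  have h : ∀ (acc : List α),
      List.foldl (fun acc x => PySem.List.insertBy (fun a b => decide (key a < key b)) (f x) acc) (acc.map f) xs =
      (List.foldl (fun acc x => PySem.List.insertBy (fun a b => decide (key (f a) < key (f b))) x acc) acc xs).map f := by
    induction xs with
    | nil => intro acc; rfl
    | cons x xs ih => intro acc; simpa [pv_insertBy_map f key x acc] using ih _
  simpa using h []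

theorem pv_sorted_congr {α κ : Type} [LT κ] [DecidableLT κ] (xs : List α) (k1 k2 : α → κ)
    (h : ∀ x ∈ xs, k1 x = k2 x) : PySem.List.sorted xs k1 = PySem.List.sorted xs k2 := by
  rw [PySem.List.sorted_eq_foldl_insertBy, PySem.List.sorted_eq_foldl_insertBy]
  have hins : ∀ (x : α) (acc : List α), k1 x = k2 x → (∀ a ∈ acc, k1 a = k2 a) →
      PySem.List.insertBy (fun a b => decide (k1 a < k1 b)) x acc =
      PySem.List.insertBy (fun a b => decide (k2 a < k2 b)) x acc := by
    intro x acc hx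
    induction acc with
    | nil => intro _; rfl
    | cons a acc ih =>
      intro ha
      simp only [PySem.List.insertBy, hx, ha a (by simp)]
      split <;> simp [ih (fun b hb => ha b (by simp [hb]))]
  have hfold : ∀ (ys acc : List α), (∀ a ∈ ys, k1 a = k2 a) → (∀ a ∈ acc, k1 a = k2 a) →
      List.foldl (fun acc x => PySem.List.insertBy (fun a b => decide (k1 a < k1 b)) x acc) acc ys =
      List.foldl (fun acc x => PySem.List.insertBy (fun a b => decide (k2 a < k2 b)) x acc) acc ys := by
    intro ys
    induction ys with
    | nil => intro acc _ _; rfl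
    | cons y ys ih =>
      intro acc hys hacc
      simp only [List.foldl_cons]
      rw [hins y acc (hys y (by simp)) hacc]
      exact ih _ (fun a ha => hys a (by simp [ha])) (fun a ha => by
        rcases (PySem.List.mem_insertBy _ y a acc).1 ha with h | h
        · exact h ▸ hys y (by simp)
        · exact hacc a h)
  exact hfold xs [] h (by simp)

theorem pv_foldl_option_map {α β : Type} (f : α → β) (xs : List α)
    (g : Option α → α → Option α) (g' : Option β → β → Option β)
    (h : ∀ (acc : Option α) (x : α), g' (acc.map f) (f x) = (g acc x).map f) :
    ∀ (acc : Option α), List.foldl (fun acc x => g' acc (f x)) (acc.map f) xs = (List.foldl g acc xs).map f := by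
  induction xs with
  | nil => intro acc; rfl
  | cons x xs ih => intro acc; simp only [List.foldl_cons, h acc x]; exact ih _

theorem pv_min2_map {α β κ₁ κ₂ : Type} [LT κ₁] [DecidableLT κ₁] [LT κ₂] [DecidableLT κ₂]
    (f : α → β) (k1 : β → κ₁) (k2 : β → κ₂) (xs : List α) :
    PySem.List.min2? (xs.map f) k1 k2 =
      (PySem.List.min2? xs (fun x => k1 (f x)) (fun x => k2 (f x))).map f := by
  simp only [PySem.List.min2?, List.foldl_map]
  exact pv_foldl_option_map f xs
    (fun acc x => match acc with
      | none => some x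
      | some m => if (decide (k1 (f x) < k1 (f m)) || !decide (k1 (f m) < k1 (f x)) && decide (k2 (f x) < k2 (f m))) = true then some x else some m)
    (fun acc y => match acc with
      | none => some y
      | some m => if (decide (k1 y < k1 m) || !decide (k1 m < k1 y) && decide (k2 y < k2 m)) = true then some y else some m)
    (fun acc x => by
      cases acc with
      | none => rfl
      | some m => dsimp only [Option.map_some]; split <;> rfl)
    none

theorem pv_corner_eq (p : List (Int × Int)) : pvCorner p = ((pvTopLeft p).2, (pvTopLeft p).1) := by
  unfold pvCorner pvTopLeft
  rw [pv_min2_map (fun q => (q.2, q.1)) (fun c => c.1) (fun c => c.2) p]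
  cases PySem.List.min2? p (fun q => q.2) (fun q => q.1) <;> rfl

theorem pv_corners_get (polygons : List (List (Int × Int))) (j : Int) :
    PySem.List.pyGetD (polygons.map pvCorner) j (0, 0) =
      ((pvTopLeft (PySem.List.pyGetD polygons j [])).2, (pvTopLeft (PySem.List.pyGetD polygons j [])).1) := by
  have h0 : pvCorner [] = ((0 : Int), (0 : Int)) := rfl
  rw [← h0, PySem.List.pyGetD_map, pv_corner_eq]

theorem pv_take_length_takeWhile {α : Type} (p : α → Bool) (l : List α) :
    l.take (l.takeWhile p).length = l.takeWhile p := by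
  induction l with
  | nil => rfl
  | cons a l ih =>
    by_cases h : p a
    · simp [h, ih]
    · simp [h]

theorem pvAdvance_nil (tol y : Int) (j : Nat) : pvAdvance tol y [] j = j := by
  rw [pvAdvance]; simp

theorem pvAdvance_cons_succ (tol y r : Int) : ∀ (m : Nat) (rs : List Int) (j : Nat), rs.length - j ≤ m →
    pvAdvance tol y (r :: rs) (j + 1) = pvAdvance tol y rs j + 1 := by
  intro m
  induction m with
  | zero =>
    intro rs j h
    have hj : ¬ j < rs.length := by omega
    have hj' : ¬ j + 1 < (r :: rs).length := by simp; omega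
    conv_lhs => rw [pvAdvance]
    conv_rhs => rw [pvAdvance]
    rw [dif_neg hj', dif_neg hj]
  | succ m ih =>
    intro rs j h
    conv_lhs => rw [pvAdvance]
    conv_rhs => rw [pvAdvance]
    by_cases hj : j < rs.length
    · have hj' : j + 1 < (r :: rs).length := by simp; omega
      rw [dif_pos hj', dif_pos hj]
      by_cases hc : rs[j] < y - tol
      · simp only [List.getElem_cons_succ, if_pos hc]
        exact ih rs (j + 1) (by omega)
      · simp only [List.getElem_cons_succ, if_neg hc]
    · have hj' : ¬ j + 1 < (r :: rs).length := by simp; omega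
      rw [dif_neg hj', dif_neg hj]

theorem pvAdvance_zero (tol y : Int) (refs : List Int) :
    pvAdvance tol y refs 0 = (refs.takeWhile (fun r => decide (r < y - tol))).length := by
  induction refs with
  | nil => simp [pvAdvance_nil]
  | cons r rs ih =>
    rw [pvAdvance]
    have h0 : 0 < (r :: rs).length := by simp
    rw [dif_pos h0]
    simp only [List.getElem_cons_zero]
    by_cases hr : r < y - tol
    · rw [if_pos hr]
      rw [pvAdvance_cons_succ tol y r rs.length rs 0 (by omega), ih]
      simp [hr]
    · rw [if_neg hr]
      simp [hr]

theorem pvAdvance_skip (tol y : Int) : ∀ (jp : Nat) (refs : List Int), jp ≤ refs.length →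
    (∀ r ∈ refs.take jp, r < y - tol) →
    pvAdvance tol y refs jp = (refs.takeWhile (fun r => decide (r < y - tol))).length := by
  intro jp
  induction jp with
  | zero => intro refs _ _; exact pvAdvance_zero tol y refs
  | succ jp ih =>
    intro refs h1 h2
    cases refs with
    | nil => simp at h1
    | cons r rs =>
      have hr : r < y - tol := h2 r (by simp [List.take_succ_cons])
      rw [pvAdvance_cons_succ tol y r rs.length rs jp (by omega)]
      rw [ih rs (by simpa using h1) (fun a ha => h2 a (by simp [List.take_succ_cons, ha]))]
      simp [hr]

theorem pvPlace_eq (tol y : Int) (t : Int × (Int × Int) × List (Int × Int)) (ht : t.2.1.2 = y) :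
    ∀ (rowsA : List (List (Int × (Int × Int) × List (Int × Int)))),
    (∀ row ∈ rowsA, pvRowY row ≤ y) →
    pvPlace tol t rowsA =
      (if ((rowsA.map pvRowY).takeWhile (fun r => decide (r < y - tol))).length < rowsA.length then
        rowsA.modify (((rowsA.map pvRowY).takeWhile (fun r => decide (r < y - tol))).length) (fun row => row ++ [t])
      else rowsA ++ [[t]]) := by
  intro rowsA
  induction rowsA with
  | nil => intro _; simp [pvPlace]
  | cons row rest ih =>
    intro hle
    have hrow : pvRowY row ≤ y := hle row (by simp)
    simp only [pvPlace, List.map_cons, ht]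
    by_cases hc : |pvRowY row - y| ≤ tol
    · have hpred : ¬ pvRowY row < y - tol := by
        rw [abs_le] at hc; omega
      rw [if_pos hc]
      simp [hpred]
    · have hpred : pvRowY row < y - tol := by
        rw [abs_sub_comm, abs_of_nonneg (by omega)] at hc; omega
      rw [if_neg hc]
      rw [ih (fun r hr => hle r (by simp [hr]))]
      simp only [List.takeWhile_cons, hpred, decide_true, List.length_cons]
      by_cases hL : ((rest.map pvRowY).takeWhile fun r => decide (r < y - tol)).length < rest.length
      · rw [if_pos hL, if_pos (by simpa using Nat.succ_lt_succ hL)]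
        simp [List.modify_cons]
      · rw [if_neg hL, if_neg (by simp; omega)]
        simp

theorem pv_map_modify {α β : Type} (f : α → β) (g : α → α) (g' : β → β)
    (h : ∀ a, f (g a) = g' (f a)) : ∀ (l : List α) (n : Nat), (l.modify n g).map f = (l.map f).modify n g' := by
  intro l
  induction l with
  | nil => intro n; simp
  | cons a l ih =>
    intro n
    cases n with
    | zero => simp [h]
    | succ n => simp [ih]

theorem pv_map_modify_self {α β : Type} (f : α → β) (g : α → α) :
    ∀ (l : List α) (n : Nat), (∀ a ∈ l, f (g a) = f a) → (l.modify n g).map f = l.map f := by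
  intro l
  induction l with
  | nil => intro n _; simp
  | cons a l ih =>
    intro n hmem
    cases n with
    | zero => simp [hmem a (by simp)]
    | succ n => simp [ih n (fun b hb => hmem b (by simp [hb]))]

theorem pv_forall_modify {α : Type} (g : α → α) (P : α → Prop) :
    ∀ (l : List α) (n : Nat), (∀ a ∈ l, P a) → (∀ a, P a → P (g a)) → ∀ a ∈ l.modify n g, P a := by
  intro l
  induction l with
  | nil => intro n _ _ a ha; simp at ha
  | cons b l ih =>
    intro n hl hg a ha
    cases n with
    | zero =>
      have ha' : a = g b ∨ a ∈ l := by simpa using ha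
      rcases ha' with hh | hh
      · exact hh ▸ hg b (hl b (by simp))
      · exact hl a (by simp [hh])
    | succ n =>
      have ha' : a = b ∨ a ∈ l.modify n g := by simpa using ha
      rcases ha' with hh | hh
      · exact hl a (by simp [hh])
      · exact ih n (fun c hc => hl c (by simp [hc])) hg a hh

theorem pvStep (polygons : List (List (Int × Int))) (tol : Int)
    (rowsA : List (List (Int × (Int × Int) × List (Int × Int))))
    (st : List (List Int) × List Int × Nat) (j : Int) (rest : List Int)
    (hinv : pvInv polygons tol rowsA st (j :: rest))
    (hsorted : ∀ j' ∈ rest, pvY polygons j ≤ pvY polygons j') :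
    pvInv polygons tol (pvPlace tol (pvF polygons j) rowsA)
      (pvBStep tol (polygons.map pvCorner) st j) rest := by
  obtain ⟨rowsB, refs, jp⟩ := st
  obtain ⟨h1, h2, h3, h4, h5, h6⟩ := hinv
  simp only at h1 h2 h3 h5 h6
  have hcur := h6 j (by simp)
  have hyB : (PySem.List.pyGetD (polygons.map pvCorner) j (0, 0)).1 = pvY polygons j := by
    rw [pv_corners_get]; rfl
  have hlen : refs.length = rowsA.length := by rw [h2]; simp
  have hrowle : ∀ row ∈ rowsA, pvRowY row ≤ pvY polygons j := fun row hr =>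
    hcur.2 (pvRowY row) (by rw [h2]; exact List.mem_map_of_mem hr)
  have hrefsL : (refs.takeWhile (fun r => decide (r < pvY polygons j - tol))).length =
      ((rowsA.map pvRowY).takeWhile (fun r => decide (r < pvY polygons j - tol))).length := by
    rw [h2]
  have hadv : pvAdvance tol (pvY polygons j) refs jp =
      ((rowsA.map pvRowY).takeWhile (fun r => decide (r < pvY polygons j - tol))).length := by
    rw [pvAdvance_skip tol (pvY polygons j) jp refs h3 hcur.1, hrefsL]
  set L := ((rowsA.map pvRowY).takeWhile (fun r => decide (r < pvY polygons j - tol))).length with hL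
  have hLle : L ≤ refs.length := by
    rw [← hrefsL]
    exact (List.takeWhile_prefix _).length_le
  have hplace := pvPlace_eq tol (pvY polygons j) (pvF polygons j) rfl rowsA hrowle
  have hstep : pvBStep tol (polygons.map pvCorner) (rowsB, refs, jp) j =
      (if L < refs.length then (rowsB.modify L (fun row => row ++ [j]), refs, L)
       else (rowsB ++ [[j]], refs ++ [pvY polygons j], L)) := by
    unfold pvBStep
    simp only [hyB, hadv]
  rw [hstep]
  by_cases hcase : L < refs.length
  · rw [if_pos hcase]
    have hplace' : pvPlace tol (pvF polygons j) rowsA = rowsA.modify L (fun row => row ++ [pvF polygons j]) := by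
      rw [hplace, if_pos (by omega)]
    rw [hplace']
    refine ⟨?_, ?_, ?_, ?_, ?_, ?_⟩
    · show rowsB.modify L (fun row => row ++ [j]) =
        (rowsA.modify L (fun row => row ++ [pvF polygons j])).map (List.map (fun t => t.1))
      rw [pv_map_modify (List.map (fun (t : Int × (Int × Int) × List (Int × Int)) => t.1))
        (fun row => row ++ [pvF polygons j]) (fun row => row ++ [j]) (fun a => by simp [pvF]), ← h1]
    · show refs = (rowsA.modify L (fun row => row ++ [pvF polygons j])).map pvRowY
      rw [pv_map_modify_self pvRowY _ rowsA L (fun a ha => ?_), ← h2]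
      obtain ⟨hne, _⟩ := h4 a ha
      cases a with
      | nil => exact absurd rfl hne
      | cons b bs => rfl
    · exact le_of_lt hcase
    · show ∀ row ∈ rowsA.modify L (fun row => row ++ [pvF polygons j]),
        row ≠ [] ∧ ∀ t ∈ row, t = pvF polygons t.1
      refine pv_forall_modify _ (fun row => row ≠ [] ∧ ∀ t ∈ row, t = pvF polygons t.1) rowsA L h4 ?_
      rintro a ⟨hne, hall⟩
      refine ⟨by simp, ?_⟩
      intro t ht
      rcases List.mem_append.1 ht with hh | hh
      · exact hall t hh
      · simp at hh; rw [hh]; rfl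
    · exact h5
    · intro j' hj'
      refine ⟨?_, fun r hr => (h6 j' (by simp [hj'])).2 r hr⟩
      intro r hr
      have hr2 : r ∈ refs.takeWhile (fun r => decide (r < pvY polygons j - tol)) := by
        rw [← pv_take_length_takeWhile (fun r => decide (r < pvY polygons j - tol)) refs, hrefsL]
        exact hr
      have hpr := List.mem_takeWhile_imp hr2
      have h2' := hsorted j' hj'
      simp only [decide_eq_true_eq] at hpr
      omega
  · rw [if_neg hcase]
    have hLeq : L = refs.length := by omega
    have hplace' : pvPlace tol (pvF polygons j) rowsA = rowsA ++ [[pvF polygons j]] := by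
      rw [hplace, if_neg (by omega)]
    rw [hplace']
    have htw : refs.takeWhile (fun r => decide (r < pvY polygons j - tol)) = refs := by
      have h' := pv_take_length_takeWhile (fun r => decide (r < pvY polygons j - tol)) refs
      rw [hrefsL, hLeq, List.take_length] at h'
      exact h'.symm
    have hallpred : ∀ r ∈ refs, r < pvY polygons j - tol := by
      intro r hr
      rw [← htw] at hr
      simpa using List.mem_takeWhile_imp hr
    refine ⟨?_, ?_, ?_, ?_, ?_, ?_⟩
    · show rowsB ++ [[j]] = (rowsA ++ [[pvF polygons j]]).map (List.map (fun t => t.1))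
      simp [h1, List.map_append, pvF]
    · show refs ++ [pvY polygons j] = (rowsA ++ [[pvF polygons j]]).map pvRowY
      rw [List.map_append, ← h2]
      rfl
    · show L ≤ (refs ++ [pvY polygons j]).length
      simp
      omega
    · intro row hrow
      rcases List.mem_append.1 hrow with hh | hh
      · exact h4 row hh
      · simp at hh
        subst hh
        exact ⟨by simp, by intro t ht; simp at ht; rw [ht]; rfl⟩
    · show (refs ++ [pvY polygons j]).Pairwise (· ≤ ·)
      rw [List.pairwise_append]
      exact ⟨h5, by simp, fun a ha b hb => by simp at hb; rw [hb]; exact hcur.2 a ha⟩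
    · intro j' hj'
      constructor
      · intro r hr
        have hr' : r ∈ (refs ++ [pvY polygons j]).take L := hr
        rw [hLeq, List.take_left] at hr'
        have h2' := hsorted j' hj'
        have hp' := hallpred r hr'
        omega
      · intro r hr
        rcases List.mem_append.1 hr with hh | hh
        · exact (h6 j' (by simp [hj'])).2 r hh
        · simp at hh; rw [hh]; exact hsorted j' hj'

theorem pvFold (polygons : List (List (Int × Int))) (tol : Int) :
    ∀ (ord : List Int) (rowsA : List (List (Int × (Int × Int) × List (Int × Int))))
      (st : List (List Int) × List Int × Nat),
    pvInv polygons tol rowsA st ord →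
    ord.Pairwise (fun a b => pvY polygons a ≤ pvY polygons b) →
    pvInv polygons tol (ord.foldl (fun r t => pvPlace tol (pvF polygons t) r) rowsA)
      (ord.foldl (pvBStep tol (polygons.map pvCorner)) st) [] := by
  intro ord
  induction ord with
  | nil => intro rowsA st hinv _; exact hinv
  | cons j rest ih =>
    intro rowsA st hinv hp
    rw [List.pairwise_cons] at hp
    simp only [List.foldl_cons]
    exact ih _ _ (pvStep polygons tol rowsA st j rest hinv hp.1) hp.2

theorem sort_polygons_equal : ∀ (polygons : List (List (Int × Int))) (tolerance : Int) (reverse : Bool),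
    sort_polygons polygons tolerance reverse = sort_polygons_alt polygons tolerance reverse := by
  intro polygons tol rev
  simp only [sort_polygons, sort_polygons_alt]
  have hc1 : ∀ i : Int, (PySem.List.pyGetD (polygons.map pvCorner) i (0, 0)).1 = pvY polygons i :=
    fun i => by rw [pv_corners_get]; rfl
  have hc2 : ∀ i : Int, (PySem.List.pyGetD (polygons.map pvCorner) i (0, 0)).2 = pvX polygons i :=
    fun i => by rw [pv_corners_get]; rfl
  have hidx : ((PySem.List.enumerate polygons).map (fun ip => (ip.1, pvTopLeft ip.2, ip.2))) =
      (PySem.List.pyRange 0 (PySem.List.len polygons)).map (pvF polygons) := by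
    rw [PySem.List.enumerate_eq_map_pyRange polygons [], List.map_map]
    rfl
  rw [hidx, pv_sorted_map (pvF polygons) (fun t => t.2.1.2)]
  have hkey : (fun i => (PySem.List.pyGetD (polygons.map pvCorner) i (0, 0)).1) =
      (fun x => ((pvF polygons x).2.1.2 : Int)) := funext fun i => hc1 i
  rw [hkey]
  set ord := PySem.List.sorted (PySem.List.pyRange 0 (PySem.List.len polygons))
      (fun x => ((pvF polygons x).2.1.2 : Int)) with hord
  rw [List.foldl_map]
  have hinv0 : pvInv polygons tol [] ([], [], 0) ord :=
    ⟨rfl, rfl, by simp, by simp, List.Pairwise.nil, fun j' _ => ⟨by simp, by simp⟩⟩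
  have hpw : ord.Pairwise (fun a b => pvY polygons a ≤ pvY polygons b) :=
    PySem.List.sorted_pairwise _ _
  obtain ⟨f1, f2, f3, f4, f5, f6⟩ := pvFold polygons tol ord [] ([], [], 0) hinv0 hpw
  set rowsF := ord.foldl (fun r t => pvPlace tol (pvF polygons t) r) [] with hrowsF
  set stF := ord.foldl (pvBStep tol (polygons.map pvCorner)) ([], [], 0) with hstF
  have hindices :
      ((rowsF.map (fun row => PySem.List.sorted row (fun t => t.2.1.1))).flatMap
        (fun row => row.map (fun t => t.1))) =
      stF.1.foldl (fun acc row => acc ++ PySem.List.sorted row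
        (fun i => (PySem.List.pyGetD (polygons.map pvCorner) i (0, 0)).2)) [] := by
    rw [PySem.List.foldl_append_eq_flatMap, List.nil_append, f1, List.flatMap_map, List.flatMap_map]
    rw [List.flatMap_def, List.flatMap_def]
    congr 1
    refine List.map_congr_left ?_
    intro row hrow
    rw [pv_sorted_map (fun t => t.1)
      (fun i => (PySem.List.pyGetD (polygons.map pvCorner) i (0, 0)).2) row]
    rw [pv_sorted_congr row
      (fun t => (PySem.List.pyGetD (polygons.map pvCorner) t.1 (0, 0)).2) (fun t => t.2.1.1)
      (fun t ht => (hc2 t.1).trans (congrArg (fun u => u.2.1.1) ((f4 row hrow).2 t ht)).symm)]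
  rw [hindices]
-- ===== VERDICT (by name: the statement is the Claim_ definition above) =====
theorem sort_polygons_spec : Claim_equal_sort_polygons := by
  intro polygons tolerance reverse _ _
  unfold Spec_sort_polygons
  exact sort_polygons_equal polygons tolerance reverse
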